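-- pv_equiv track=rewrite | github.com/Andy-SS/DoxygenToDrawio | DoxygenToDrawio.py | get_execution_priority
-- ===== SOURCE A (Python) =====
-- def get_execution_priority(label, outgoing_count, incoming_count):
--     """Calculate execution priority for sequence-based ordering"""
--     label_lower = label.lower()
--     priority = 0
--
--     # Function type priorities (higher = earlier in execution)
--     if any(pattern in label_lower for pattern in ['main', '__main__', 'main()', 'int main']):
--         priority += 100
--     elif any(pattern in label_lower for pattern in ['__init__', 'constructor']):
--         priority += 90
--     elif any(pattern in label_lower for pattern in ['setup', 'initialize', 'init', 'config']):
--         priority += 80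
--     elif any(pattern in label_lower for pattern in ['start', 'begin', 'run', 'execute']):
--         priority += 70
--     elif any(pattern in label_lower for pattern in ['process', 'handle', 'update', 'loop']):
--         priority += 60
--     elif any(pattern in label_lower for pattern in ['read', 'input', 'receive', 'get']):
--         priority += 50
--     elif any(pattern in label_lower for pattern in ['write', 'output', 'send', 'transmit']):
--         priority += 45
--     elif any(pattern in label_lower for pattern in ['calculate', 'compute', 'transform']):
--         priority += 40
--     elif any(pattern in label_lower for pattern in ['validate', 'check', 'verify']):
--         priority += 35
--     elif any(pattern in label_lower for pattern in ['save', 'store', 'persist']):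
--         priority += 30
--     elif any(pattern in label_lower for pattern in ['cleanup', 'close', 'finalize', 'destroy']):
--         priority += 20
--     elif any(pattern in label_lower for pattern in ['error', 'fail', 'exception', 'abort']):
--         priority += 15
--     elif any(pattern in label_lower for pattern in ['test', 'debug', 'trace']):
--         priority += 10
--     elif any(pattern in label_lower for pattern in ['helper', 'utility', 'util']):
--         priority += 5
--
--     # Connectivity-based adjustments
--     priority += min(20, outgoing_count * 2)  # Functions that call many others are orchestrators
--     priority += min(10, incoming_count)      # Popular functions are important
--
--     return priority
-- ===== SOURCE B (Python) =====
-- # Flat keyword -> score map; the priority is the MAX score over all matching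
-- # keywords (order-independent).  This equals A's first-match elif chain because
-- # the chain's tier scores are strictly descending.
-- PATTERN_SCORES = {
--     'main': 100, '__main__': 100, 'main()': 100, 'int main': 100,
--     '__init__': 90, 'constructor': 90,
--     'setup': 80, 'initialize': 80, 'init': 80, 'config': 80,
--     'start': 70, 'begin': 70, 'run': 70, 'execute': 70,
--     'process': 60, 'handle': 60, 'update': 60, 'loop': 60,
--     'read': 50, 'input': 50, 'receive': 50, 'get': 50,
--     'write': 45, 'output': 45, 'send': 45, 'transmit': 45,
--     'calculate': 40, 'compute': 40, 'transform': 40,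
--     'validate': 35, 'check': 35, 'verify': 35,
--     'save': 30, 'store': 30, 'persist': 30,
--     'cleanup': 20, 'close': 20, 'finalize': 20, 'destroy': 20,
--     'error': 15, 'fail': 15, 'exception': 15, 'abort': 15,
--     'test': 10, 'debug': 10, 'trace': 10,
--     'helper': 5, 'utility': 5, 'util': 5,
-- }
--
-- def get_execution_priority(label, outgoing_count, incoming_count):
--     label_lower = label.lower()
--     priority = max((s for p, s in PATTERN_SCORES.items() if p in label_lower),
--                    default=0)
--     return priority + min(20, outgoing_count * 2) + min(10, incoming_count)
-- ===== Notes on version B (the rewrite author's own statement) =====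
-- stated objective: alternative
-- what changed: Replaces the ordered 14-branch first-match elif chain with a flat keyword-to-score map and an order-independent maximum over all matching keywords (correct because the chain's tier scores are strictly descending).
import Mathlib
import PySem

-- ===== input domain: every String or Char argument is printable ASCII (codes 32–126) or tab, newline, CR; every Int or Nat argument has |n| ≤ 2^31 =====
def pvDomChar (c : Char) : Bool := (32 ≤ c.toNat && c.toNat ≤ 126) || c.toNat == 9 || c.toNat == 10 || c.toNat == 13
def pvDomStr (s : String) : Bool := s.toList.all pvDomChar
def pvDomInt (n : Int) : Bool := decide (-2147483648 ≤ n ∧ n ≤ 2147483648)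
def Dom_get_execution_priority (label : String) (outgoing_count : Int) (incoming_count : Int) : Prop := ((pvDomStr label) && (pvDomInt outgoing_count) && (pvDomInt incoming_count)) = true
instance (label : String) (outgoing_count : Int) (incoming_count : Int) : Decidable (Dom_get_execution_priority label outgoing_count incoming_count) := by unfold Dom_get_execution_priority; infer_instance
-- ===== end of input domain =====

-- B replaces A's ordered first-match elif chain by an order-independent maximum over a flat
-- keyword→score map (correct because the chain's tier scores are strictly descending).

-- ===== PORT A =====
-- literal transliteration of A's if/elif chain
def get_execution_priority (label : String) (outgoing_count : Int) (incoming_count : Int) : Int :=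
  let ll := PySem.Str.lower label
  let priority : Int := 0
  let priority :=
    if ["main", "__main__", "main()", "int main"].any (fun p => PySem.Str.isIn p ll) then priority + 100
    else if ["__init__", "constructor"].any (fun p => PySem.Str.isIn p ll) then priority + 90
    else if ["setup", "initialize", "init", "config"].any (fun p => PySem.Str.isIn p ll) then priority + 80
    else if ["start", "begin", "run", "execute"].any (fun p => PySem.Str.isIn p ll) then priority + 70
    else if ["process", "handle", "update", "loop"].any (fun p => PySem.Str.isIn p ll) then priority + 60
    else if ["read", "input", "receive", "get"].any (fun p => PySem.Str.isIn p ll) then priority + 50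
    else if ["write", "output", "send", "transmit"].any (fun p => PySem.Str.isIn p ll) then priority + 45
    else if ["calculate", "compute", "transform"].any (fun p => PySem.Str.isIn p ll) then priority + 40
    else if ["validate", "check", "verify"].any (fun p => PySem.Str.isIn p ll) then priority + 35
    else if ["save", "store", "persist"].any (fun p => PySem.Str.isIn p ll) then priority + 30
    else if ["cleanup", "close", "finalize", "destroy"].any (fun p => PySem.Str.isIn p ll) then priority + 20
    else if ["error", "fail", "exception", "abort"].any (fun p => PySem.Str.isIn p ll) then priority + 15
    else if ["test", "debug", "trace"].any (fun p => PySem.Str.isIn p ll) then priority + 10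
    else if ["helper", "utility", "util"].any (fun p => PySem.Str.isIn p ll) then priority + 5
    else priority
  let priority := priority + min 20 (outgoing_count * 2)
  let priority := priority + min 10 incoming_count
  priority

-- ===== PORT B =====
-- the flat PATTERN_SCORES dict, in insertion order
def pvPatternScores : List (String × Int) :=
  [ ("main", 100), ("__main__", 100), ("main()", 100), ("int main", 100),
    ("__init__", 90), ("constructor", 90),
    ("setup", 80), ("initialize", 80), ("init", 80), ("config", 80),
    ("start", 70), ("begin", 70), ("run", 70), ("execute", 70),
    ("process", 60), ("handle", 60), ("update", 60), ("loop", 60),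
    ("read", 50), ("input", 50), ("receive", 50), ("get", 50),
    ("write", 45), ("output", 45), ("send", 45), ("transmit", 45),
    ("calculate", 40), ("compute", 40), ("transform", 40),
    ("validate", 35), ("check", 35), ("verify", 35),
    ("save", 30), ("store", 30), ("persist", 30),
    ("cleanup", 20), ("close", 20), ("finalize", 20), ("destroy", 20),
    ("error", 15), ("fail", 15), ("exception", 15), ("abort", 15),
    ("test", 10), ("debug", 10), ("trace", 10),
    ("helper", 5), ("utility", 5), ("util", 5) ]

-- max(s for p, s in PATTERN_SCORES.items() if p in label_lower) with default 0
def get_execution_priority_alt (label : String) (outgoing_count : Int) (incoming_count : Int) : Int :=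
  let ll := PySem.Str.lower label
  let priority :=
    (((pvPatternScores.filter (fun ps => PySem.Str.isIn ps.1 ll)).map Prod.snd).foldl max 0)
  priority + min 20 (outgoing_count * 2) + min 10 incoming_count

-- ===== PRECONDITION & SPEC =====
def Spec_get_execution_priority (label : String) (outgoing_count : Int) (incoming_count : Int) (out : Int) : Prop := out = get_execution_priority_alt label outgoing_count incoming_count
instance (label : String) (outgoing_count : Int) (incoming_count : Int) (out : Int) : Decidable (Spec_get_execution_priority label outgoing_count incoming_count out) := by unfold Spec_get_execution_priority; infer_instance

-- ===== CLAIM =====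
def Claim_equal_get_execution_priority : Prop := ∀ (label : String) (outgoing_count : Int) (incoming_count : Int), Dom_get_execution_priority label outgoing_count incoming_count → Spec_get_execution_priority label outgoing_count incoming_count (get_execution_priority label outgoing_count incoming_count)

-- ===== LEMMAS AND PROOFS =====

-- the 14 tier conditions/scores, in chain order (proof-only abstraction)
def pvCs (ll : String) : List (Bool × Int) :=
  [ (["main", "__main__", "main()", "int main"].any (fun p => PySem.Str.isIn p ll), 100),
    (["__init__", "constructor"].any (fun p => PySem.Str.isIn p ll), 90),
    (["setup", "initialize", "init", "config"].any (fun p => PySem.Str.isIn p ll), 80),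
    (["start", "begin", "run", "execute"].any (fun p => PySem.Str.isIn p ll), 70),
    (["process", "handle", "update", "loop"].any (fun p => PySem.Str.isIn p ll), 60),
    (["read", "input", "receive", "get"].any (fun p => PySem.Str.isIn p ll), 50),
    (["write", "output", "send", "transmit"].any (fun p => PySem.Str.isIn p ll), 45),
    (["calculate", "compute", "transform"].any (fun p => PySem.Str.isIn p ll), 40),
    (["validate", "check", "verify"].any (fun p => PySem.Str.isIn p ll), 35),
    (["save", "store", "persist"].any (fun p => PySem.Str.isIn p ll), 30),
    (["cleanup", "close", "finalize", "destroy"].any (fun p => PySem.Str.isIn p ll), 20),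
    (["error", "fail", "exception", "abort"].any (fun p => PySem.Str.isIn p ll), 15),
    (["test", "debug", "trace"].any (fun p => PySem.Str.isIn p ll), 10),
    (["helper", "utility", "util"].any (fun p => PySem.Str.isIn p ll), 5) ]

def pvFold (l : List (Bool × Int)) (a : Int) : Int :=
  l.foldl (fun a cs => if cs.1 then max a cs.2 else a) a

def pvFM : List (Bool × Int) → Int
  | [] => 0
  | (c, s) :: r => if c then s else pvFM r

theorem pvFold_absorb (l : List (Bool × Int)) (a : Int) (h : ∀ x ∈ l, x.2 ≤ a) :
    pvFold l a = a := by
  induction l with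
  | nil => rfl
  | cons x r ih =>
    have hx : x.2 ≤ a := h x (List.mem_cons_self)
    have : (if x.1 then max a x.2 else a) = a := by
      split <;> [exact max_eq_left hx; rfl]
    simpa [pvFold, List.foldl, this] using ih (fun y hy => h y (List.mem_cons_of_mem _ hy))
  
theorem pvFold_eq_FM (l : List (Bool × Int)) (h0 : ∀ x ∈ l, 0 ≤ x.2)
    (hp : l.Pairwise (fun x y => y.2 ≤ x.2)) : pvFold l 0 = pvFM l := by
  induction l with
  | nil => rfl
  | cons x r ih =>
    rcases List.pairwise_cons.mp hp with ⟨hle, hr⟩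
    by_cases hc : x.1
    · have h0x : (0 : Int) ≤ x.2 := h0 x (List.mem_cons_self)
      simp only [pvFold, List.foldl, hc, if_pos, pvFM]
      rw [max_eq_right h0x]
      exact pvFold_absorb r x.2 hle
    · simp only [pvFold, List.foldl, hc, pvFM]
      exact ih (fun y hy => h0 y (List.mem_cons_of_mem _ hy)) hr

-- folding max over one constant-score keyword group of the filtered map
theorem pvGroupFold (ll : String) (pats : List String) (s a : Int) :
    (((pats.map (fun p => (p, s))).filter (fun ps => PySem.Str.isIn ps.1 ll)).map Prod.snd).foldl max a
      = if pats.any (fun p => PySem.Str.isIn p ll) then max a s else a := by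
  induction pats generalizing a with
  | nil => rfl
  | cons p r ih =>
    simp only [List.map_cons, List.filter_cons, List.any_cons]
    by_cases hp : PySem.Str.isIn p ll
    · rw [if_pos hp]
      simp only [hp, Bool.true_or, if_pos, List.map_cons, List.foldl_cons]
      rw [ih (max a s)]
      split <;> simp
    · rw [if_neg hp, ih a]
      simp only [Bool.not_eq_true] at hp
      simp only [hp, Bool.false_or]

-- B's max over the flat map equals the sequential tier fold
theorem pvMax_eq_fold (ll : String) :
    (((pvPatternScores.filter (fun ps => PySem.Str.isIn ps.1 ll)).map Prod.snd).foldl max 0)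
      = pvFold (pvCs ll) 0 := by
  have hflat : pvPatternScores =
      (["main", "__main__", "main()", "int main"].map (fun p => (p, (100:Int))))
      ++ (["__init__", "constructor"].map (fun p => (p, (90:Int))))
      ++ (["setup", "initialize", "init", "config"].map (fun p => (p, (80:Int))))
      ++ (["start", "begin", "run", "execute"].map (fun p => (p, (70:Int))))
      ++ (["process", "handle", "update", "loop"].map (fun p => (p, (60:Int))))
      ++ (["read", "input", "receive", "get"].map (fun p => (p, (50:Int))))
      ++ (["write", "output", "send", "transmit"].map (fun p => (p, (45:Int))))
      ++ (["calculate", "compute", "transform"].map (fun p => (p, (40:Int))))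
      ++ (["validate", "check", "verify"].map (fun p => (p, (35:Int))))
      ++ (["save", "store", "persist"].map (fun p => (p, (30:Int))))
      ++ (["cleanup", "close", "finalize", "destroy"].map (fun p => (p, (20:Int))))
      ++ (["error", "fail", "exception", "abort"].map (fun p => (p, (15:Int))))
      ++ (["test", "debug", "trace"].map (fun p => (p, (10:Int))))
      ++ (["helper", "utility", "util"].map (fun p => (p, (5:Int)))) := rfl
  rw [hflat]
  simp only [List.filter_append, List.map_append, List.foldl_append, pvGroupFold]
  rfl

theorem pvCs_nonneg (ll : String) : ∀ x ∈ pvCs ll, (0 : Int) ≤ x.2 := by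
  intro x hx
  simp only [pvCs, List.mem_cons, List.not_mem_nil, or_false] at hx
  rcases hx with h|h|h|h|h|h|h|h|h|h|h|h|h|h <;> subst h <;> norm_num

theorem pvCs_sorted (ll : String) : (pvCs ll).Pairwise (fun x y => y.2 ≤ x.2) := by
  simp [pvCs, List.pairwise_cons]

theorem pvFM_cs (ll : String) : pvFM (pvCs ll) =
    (if ["main", "__main__", "main()", "int main"].any (fun p => PySem.Str.isIn p ll) then (100 : Int)
    else if ["__init__", "constructor"].any (fun p => PySem.Str.isIn p ll) then 90
    else if ["setup", "initialize", "init", "config"].any (fun p => PySem.Str.isIn p ll) then 80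
    else if ["start", "begin", "run", "execute"].any (fun p => PySem.Str.isIn p ll) then 70
    else if ["process", "handle", "update", "loop"].any (fun p => PySem.Str.isIn p ll) then 60
    else if ["read", "input", "receive", "get"].any (fun p => PySem.Str.isIn p ll) then 50
    else if ["write", "output", "send", "transmit"].any (fun p => PySem.Str.isIn p ll) then 45
    else if ["calculate", "compute", "transform"].any (fun p => PySem.Str.isIn p ll) then 40
    else if ["validate", "check", "verify"].any (fun p => PySem.Str.isIn p ll) then 35
    else if ["save", "store", "persist"].any (fun p => PySem.Str.isIn p ll) then 30
    else if ["cleanup", "close", "finalize", "destroy"].any (fun p => PySem.Str.isIn p ll) then 20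
    else if ["error", "fail", "exception", "abort"].any (fun p => PySem.Str.isIn p ll) then 15
    else if ["test", "debug", "trace"].any (fun p => PySem.Str.isIn p ll) then 10
    else if ["helper", "utility", "util"].any (fun p => PySem.Str.isIn p ll) then 5
    else 0) := rfl

-- ===== VERDICT =====
theorem get_execution_priority_spec : Claim_equal_get_execution_priority := by
  intro label o i _
  unfold Spec_get_execution_priority get_execution_priority get_execution_priority_alt
  dsimp only
  rw [pvMax_eq_fold, pvFold_eq_FM _ (pvCs_nonneg _) (pvCs_sorted _), pvFM_cs]
  norm_num
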